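-- pv_equiv track=rewrite | github.com/RaulSoler/PROYECTO-CURSO | Funciones/Funciones.py | clasificador_rendimiento_forma
-- ===== SOURCE A (Python) =====
-- def clasificador_rendimiento_forma(form):
--     if 'GGG' in form:
--         return 'Excelente'
--     elif any(seq in form for seq in ['GGE', 'EGG','GEG']):
--         return 'Muy Buena'
--     elif any(seq in form for seq in ['GGP', 'PGG', 'GPG']):
--         return 'Buena'
--     elif any(seq in form for seq in ['GEE', 'EGE', 'EEG', 'GPE', 'GEP', 'EPG', 'EGP', 'PGE', 'PEG']):
--         return 'Regular'
--     elif any(seq in form for seq in ['PPP', 'EPP', 'PEP','PPE']):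
--         return 'Mala'
--     else:
--         return 'Irregular'
-- ===== SOURCE B (Python) =====
-- def clasificador_rendimiento_forma(form):
--     labels = ['Irregular', 'Mala', 'Regular', 'Buena', 'Muy Buena', 'Excelente']
--     table = {(3, 0, 0): 5, (2, 1, 0): 4, (2, 0, 1): 3,
--              (1, 2, 0): 2, (1, 1, 1): 2, (0, 0, 3): 1, (0, 1, 2): 1}
--     best = 0
--     for i in range(len(form) - 2):
--         w = form[i:i + 3]
--         key = (w.count('G'), w.count('E'), w.count('P'))
--         best = max(best, table.get(key, 0))
--     return labels[best]
-- ===== Notes on version B (the rewrite author's own statement) =====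
-- stated objective: alternative
-- what changed: Replaces A's priority chain of 20 literal substring tests by a single sliding-window pass that counts G/E/P per length-3 window, looks the composition up in a rank table and returns the label of the maximum rank.
import Mathlib
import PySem

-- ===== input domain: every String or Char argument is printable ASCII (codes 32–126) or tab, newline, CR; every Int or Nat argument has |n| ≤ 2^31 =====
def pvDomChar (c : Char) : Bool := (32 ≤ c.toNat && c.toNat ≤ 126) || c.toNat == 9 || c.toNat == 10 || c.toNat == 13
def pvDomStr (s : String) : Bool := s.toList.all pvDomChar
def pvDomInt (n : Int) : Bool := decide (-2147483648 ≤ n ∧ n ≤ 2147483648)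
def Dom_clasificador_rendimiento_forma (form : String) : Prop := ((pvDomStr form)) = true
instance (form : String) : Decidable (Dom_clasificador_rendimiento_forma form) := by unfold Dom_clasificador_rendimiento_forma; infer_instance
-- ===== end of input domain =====

-- B replaces A's 20 literal substring tests by one sliding-window pass that counts G/E/P per
-- window, looks the composition up in a rank table and keeps the maximum rank (objective: alternative).

-- ===== PORT A =====
def clasificador_rendimiento_forma (form : String) : String :=
  if PySem.Str.isIn "GGG" form then "Excelente"
  else if (["GGE", "EGG", "GEG"].any fun seq => PySem.Str.isIn seq form) then "Muy Buena"
  else if (["GGP", "PGG", "GPG"].any fun seq => PySem.Str.isIn seq form) then "Buena"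
  else if (["GEE", "EGE", "EEG", "GPE", "GEP", "EPG", "EGP", "PGE", "PEG"].any fun seq => PySem.Str.isIn seq form) then "Regular"
  else if (["PPP", "EPP", "PEP", "PPE"].any fun seq => PySem.Str.isIn seq form) then "Mala"
  else "Irregular"

-- ===== PORT B =====
-- table.get((g,e,p), 0) on the literal dict of Source B
def pvTable : Nat × Nat × Nat → Nat
  | (3, 0, 0) => 5
  | (2, 1, 0) => 4
  | (2, 0, 1) => 3
  | (1, 2, 0) => 2
  | (1, 1, 1) => 2
  | (0, 0, 3) => 1
  | (0, 1, 2) => 1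
  | _ => 0

-- rank of one window w = form[i:i+3]: key = (w.count('G'), w.count('E'), w.count('P'))
def pvRank3 (a b c : Char) : Nat :=
  pvTable
    ((if a = 'G' then 1 else 0) + (if b = 'G' then 1 else 0) + (if c = 'G' then 1 else 0),
     (if a = 'E' then 1 else 0) + (if b = 'E' then 1 else 0) + (if c = 'E' then 1 else 0),
     (if a = 'P' then 1 else 0) + (if b = 'P' then 1 else 0) + (if c = 'P' then 1 else 0))

-- the loop: best = max(best, table.get(key, 0)) over every length-3 window
def pvBestGo : List Char → Nat → Nat
  | a :: b :: c :: rest, best => pvBestGo (b :: c :: rest) (max best (pvRank3 a b c))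
  | _, best => best

def clasificador_rendimiento_forma_alt (form : String) : String :=
  PySem.List.pyGetD ["Irregular", "Mala", "Regular", "Buena", "Muy Buena", "Excelente"]
    (pvBestGo form.toList 0 : Int) ""

-- ===== PRECONDITION & SPEC =====
def Spec_clasificador_rendimiento_forma (form : String) (out : String) : Prop := out = clasificador_rendimiento_forma_alt form
instance (form : String) (out : String) : Decidable (Spec_clasificador_rendimiento_forma form out) := by unfold Spec_clasificador_rendimiento_forma; infer_instance

-- ===== CLAIM (what is proved, stated in full; the proofs are below) =====
def Claim_equal_clasificador_rendimiento_forma : Prop := ∀ (form : String), Dom_clasificador_rendimiento_forma form → Spec_clasificador_rendimiento_forma form (clasificador_rendimiento_forma form)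

-- ===== LEMMAS AND PROOFS =====

theorem pvTable_le (k : Nat × Nat × Nat) : pvTable k ≤ 5 := by
  unfold pvTable; split <;> omega

theorem pvRank3_le (a b c : Char) : pvRank3 a b c ≤ 5 := pvTable_le _

-- the four-way classification of a character used for case analysis
theorem pvCls4 (a : Char) : a = 'G' ∨ a = 'E' ∨ a = 'P' ∨ (a ≠ 'G' ∧ a ≠ 'E' ∧ a ≠ 'P') := by
  by_cases h1 : a = 'G' <;> by_cases h2 : a = 'E' <;> by_cases h3 : a = 'P' <;> tauto

theorem pvRank5_iff (a b c : Char) : 5 ≤ pvRank3 a b c ↔ [a, b, c] = ['G','G','G'] := by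
  rcases pvCls4 a with ha | ha | ha | ⟨ha1, ha2, ha3⟩ <;>
  rcases pvCls4 b with hb | hb | hb | ⟨hb1, hb2, hb3⟩ <;>
  rcases pvCls4 c with hc | hc | hc | ⟨hc1, hc2, hc3⟩ <;>
  subst_vars <;> simp_all [pvRank3, pvTable]

theorem pvRank4_iff (a b c : Char) : 4 ≤ pvRank3 a b c ↔
    [a, b, c] ∈ [['G','G','G'], ['G','G','E'], ['E','G','G'], ['G','E','G']] := by
  rcases pvCls4 a with ha | ha | ha | ⟨ha1, ha2, ha3⟩ <;>
  rcases pvCls4 b with hb | hb | hb | ⟨hb1, hb2, hb3⟩ <;>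
  rcases pvCls4 c with hc | hc | hc | ⟨hc1, hc2, hc3⟩ <;>
  subst_vars <;> simp_all [pvRank3, pvTable]

theorem pvRank3'_iff (a b c : Char) : 3 ≤ pvRank3 a b c ↔
    [a, b, c] ∈ [['G','G','G'], ['G','G','E'], ['E','G','G'], ['G','E','G'],
                 ['G','G','P'], ['P','G','G'], ['G','P','G']] := by
  rcases pvCls4 a with ha | ha | ha | ⟨ha1, ha2, ha3⟩ <;>
  rcases pvCls4 b with hb | hb | hb | ⟨hb1, hb2, hb3⟩ <;>
  rcases pvCls4 c with hc | hc | hc | ⟨hc1, hc2, hc3⟩ <;>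
  subst_vars <;> simp_all [pvRank3, pvTable]

theorem pvRank2_iff (a b c : Char) : 2 ≤ pvRank3 a b c ↔
    [a, b, c] ∈ [['G','G','G'], ['G','G','E'], ['E','G','G'], ['G','E','G'],
                 ['G','G','P'], ['P','G','G'], ['G','P','G'],
                 ['G','E','E'], ['E','G','E'], ['E','E','G'], ['G','P','E'], ['G','E','P'],
                 ['E','P','G'], ['E','G','P'], ['P','G','E'], ['P','E','G']] := by
  rcases pvCls4 a with ha | ha | ha | ⟨ha1, ha2, ha3⟩ <;>
  rcases pvCls4 b with hb | hb | hb | ⟨hb1, hb2, hb3⟩ <;>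
  rcases pvCls4 c with hc | hc | hc | ⟨hc1, hc2, hc3⟩ <;>
  subst_vars <;> simp_all [pvRank3, pvTable]

theorem pvRank1_iff (a b c : Char) : 1 ≤ pvRank3 a b c ↔
    [a, b, c] ∈ [['G','G','G'], ['G','G','E'], ['E','G','G'], ['G','E','G'],
                 ['G','G','P'], ['P','G','G'], ['G','P','G'],
                 ['G','E','E'], ['E','G','E'], ['E','E','G'], ['G','P','E'], ['G','E','P'],
                 ['E','P','G'], ['E','G','P'], ['P','G','E'], ['P','E','G'],
                 ['P','P','P'], ['E','P','P'], ['P','E','P'], ['P','P','E']] := by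
  rcases pvCls4 a with ha | ha | ha | ⟨ha1, ha2, ha3⟩ <;>
  rcases pvCls4 b with hb | hb | hb | ⟨hb1, hb2, hb3⟩ <;>
  rcases pvCls4 c with hc | hc | hc | ⟨hc1, hc2, hc3⟩ <;>
  subst_vars <;> simp_all [pvRank3, pvTable]

theorem pvBestGo_acc (cs : List Char) : ∀ acc, pvBestGo cs acc = max acc (pvBestGo cs 0) := by
  induction cs with
  | nil => intro acc; simp [pvBestGo]
  | cons a t ih =>
      cases t with
      | nil => intro acc; simp [pvBestGo]
      | cons b t2 => cases t2 with
          | nil => intro acc; simp [pvBestGo]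
          | cons c rest =>
              intro acc
              rw [pvBestGo, pvBestGo, ih, ih (max 0 _)]
              omega

theorem pvBestGo_le (cs : List Char) : pvBestGo cs 0 ≤ 5 := by
  induction cs with
  | nil => simp [pvBestGo]
  | cons a t ih =>
      cases t with
      | nil => simp [pvBestGo]
      | cons b t2 => cases t2 with
          | nil => simp [pvBestGo]
          | cons c rest =>
              rw [pvBestGo, pvBestGo_acc]
              have h1 := pvRank3_le a b c
              have h2 : pvBestGo (b :: c :: rest) 0 ≤ 5 := ih
              omega

theorem pvBestGo_ge_iff (r : Nat) (hr : 1 ≤ r) (cs : List Char) :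
    r ≤ pvBestGo cs 0 ↔ ∃ x y z, [x, y, z] <:+: cs ∧ r ≤ pvRank3 x y z := by
  induction cs with
  | nil =>
      simp only [pvBestGo]
      constructor
      · omega
      · rintro ⟨x, y, z, h, -⟩
        have := h.length_le; simp at this
  | cons a t ih =>
      cases t with
      | nil =>
          simp only [pvBestGo]
          constructor
          · omega
          · rintro ⟨x, y, z, h, -⟩
            have := h.length_le; simp at this
      | cons b t2 => cases t2 with
          | nil =>
              simp only [pvBestGo]
              constructor
              · omega
              · rintro ⟨x, y, z, h, -⟩
                have := h.length_le; simp at this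
          | cons c rest =>
              rw [pvBestGo, pvBestGo_acc]
              have hmax : r ≤ max (max 0 (pvRank3 a b c)) (pvBestGo (b :: c :: rest) 0) ↔
                  r ≤ pvRank3 a b c ∨ r ≤ pvBestGo (b :: c :: rest) 0 := by omega
              rw [hmax, ih]
              constructor
              · rintro (h | ⟨x, y, z, hInf, hRank⟩)
                · exact ⟨a, b, c, (show [a, b, c] <+: a :: b :: c :: rest from ⟨rest, rfl⟩).isInfix, h⟩
                · exact ⟨x, y, z, hInf.trans (List.suffix_cons a (b :: c :: rest)).isInfix, hRank⟩
              · rintro ⟨x, y, z, hInf, hRank⟩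
                rcases List.infix_cons_iff.mp hInf with hPre | hInf'
                · simp only [List.cons_prefix_cons, List.nil_prefix, and_true] at hPre
                  obtain ⟨rfl, rfl, rfl⟩ := hPre
                  exact Or.inl hRank
                · exact Or.inr ⟨x, y, z, hInf', hRank⟩

-- infix of toList ↔ A's isIn test
theorem pvIsIn_iff (sub form : String) : PySem.Str.isIn sub form = true ↔ sub.toList <:+: form.toList :=
  PySem.Str.isIn_iff_infix sub form

-- ===== VERDICT (by name: the statement is the Claim_ definition above) =====
theorem clasificador_rendimiento_forma_spec : Claim_equal_clasificador_rendimiento_forma := by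
  intro form _
  unfold Spec_clasificador_rendimiento_forma clasificador_rendimiento_forma clasificador_rendimiento_forma_alt
  have hub := pvBestGo_le form.toList
  split_ifs with h1 h2 h3 h4 h5
  · have hge : 5 ≤ pvBestGo form.toList 0 :=
      (pvBestGo_ge_iff 5 (by omega) _).mpr ⟨'G', 'G', 'G', (pvIsIn_iff "GGG" form).mp h1, by decide⟩
    rw [show pvBestGo form.toList 0 = 5 from by omega]
    decide
  · have hge : 4 ≤ pvBestGo form.toList 0 := by
      simp only [List.any_eq_true, List.mem_cons, List.not_mem_nil, or_false] at h2
      obtain ⟨s, hs, h⟩ := h2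
      rcases hs with rfl|rfl|rfl
      · exact (pvBestGo_ge_iff 4 (by omega) _).mpr ⟨'G', 'G', 'E', (pvIsIn_iff "GGE" form).mp h, by decide⟩
      · exact (pvBestGo_ge_iff 4 (by omega) _).mpr ⟨'E', 'G', 'G', (pvIsIn_iff "EGG" form).mp h, by decide⟩
      · exact (pvBestGo_ge_iff 4 (by omega) _).mpr ⟨'G', 'E', 'G', (pvIsIn_iff "GEG" form).mp h, by decide⟩
    have hlt : ¬ 5 ≤ pvBestGo form.toList 0 := by
      intro hc
      obtain ⟨x, y, z, hInf, hRank⟩ := (pvBestGo_ge_iff 5 (by omega) _).mp hc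
      rw [(pvRank5_iff x y z).mp hRank] at hInf
      exact h1 ((pvIsIn_iff "GGG" form).mpr hInf)
    rw [show pvBestGo form.toList 0 = 4 from by omega]
    decide
  · have hge : 3 ≤ pvBestGo form.toList 0 := by
      simp only [List.any_eq_true, List.mem_cons, List.not_mem_nil, or_false] at h3
      obtain ⟨s, hs, h⟩ := h3
      rcases hs with rfl|rfl|rfl
      · exact (pvBestGo_ge_iff 3 (by omega) _).mpr ⟨'G', 'G', 'P', (pvIsIn_iff "GGP" form).mp h, by decide⟩
      · exact (pvBestGo_ge_iff 3 (by omega) _).mpr ⟨'P', 'G', 'G', (pvIsIn_iff "PGG" form).mp h, by decide⟩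
      · exact (pvBestGo_ge_iff 3 (by omega) _).mpr ⟨'G', 'P', 'G', (pvIsIn_iff "GPG" form).mp h, by decide⟩
    have hlt : ¬ 4 ≤ pvBestGo form.toList 0 := by
      intro hc
      obtain ⟨x, y, z, hInf, hRank⟩ := (pvBestGo_ge_iff 4 (by omega) _).mp hc
      have hm := (pvRank4_iff x y z).mp hRank
      simp only [List.mem_cons, List.not_mem_nil, or_false] at hm
      rcases hm with h|h|h|h
      · rw [h] at hInf; exact h1 ((pvIsIn_iff "GGG" form).mpr hInf)
      · rw [h] at hInf
        exact h2 (by simp only [List.any_eq_true]; exact ⟨"GGE", by simp, (pvIsIn_iff "GGE" form).mpr hInf⟩)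
      · rw [h] at hInf
        exact h2 (by simp only [List.any_eq_true]; exact ⟨"EGG", by simp, (pvIsIn_iff "EGG" form).mpr hInf⟩)
      · rw [h] at hInf
        exact h2 (by simp only [List.any_eq_true]; exact ⟨"GEG", by simp, (pvIsIn_iff "GEG" form).mpr hInf⟩)
    rw [show pvBestGo form.toList 0 = 3 from by omega]
    decide
  · have hge : 2 ≤ pvBestGo form.toList 0 := by
      simp only [List.any_eq_true, List.mem_cons, List.not_mem_nil, or_false] at h4
      obtain ⟨s, hs, h⟩ := h4
      rcases hs with rfl|rfl|rfl|rfl|rfl|rfl|rfl|rfl|rfl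
      · exact (pvBestGo_ge_iff 2 (by omega) _).mpr ⟨'G', 'E', 'E', (pvIsIn_iff "GEE" form).mp h, by decide⟩
      · exact (pvBestGo_ge_iff 2 (by omega) _).mpr ⟨'E', 'G', 'E', (pvIsIn_iff "EGE" form).mp h, by decide⟩
      · exact (pvBestGo_ge_iff 2 (by omega) _).mpr ⟨'E', 'E', 'G', (pvIsIn_iff "EEG" form).mp h, by decide⟩
      · exact (pvBestGo_ge_iff 2 (by omega) _).mpr ⟨'G', 'P', 'E', (pvIsIn_iff "GPE" form).mp h, by decide⟩
      · exact (pvBestGo_ge_iff 2 (by omega) _).mpr ⟨'G', 'E', 'P', (pvIsIn_iff "GEP" form).mp h, by decide⟩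
      · exact (pvBestGo_ge_iff 2 (by omega) _).mpr ⟨'E', 'P', 'G', (pvIsIn_iff "EPG" form).mp h, by decide⟩
      · exact (pvBestGo_ge_iff 2 (by omega) _).mpr ⟨'E', 'G', 'P', (pvIsIn_iff "EGP" form).mp h, by decide⟩
      · exact (pvBestGo_ge_iff 2 (by omega) _).mpr ⟨'P', 'G', 'E', (pvIsIn_iff "PGE" form).mp h, by decide⟩
      · exact (pvBestGo_ge_iff 2 (by omega) _).mpr ⟨'P', 'E', 'G', (pvIsIn_iff "PEG" form).mp h, by decide⟩
    have hlt : ¬ 3 ≤ pvBestGo form.toList 0 := by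
      intro hc
      obtain ⟨x, y, z, hInf, hRank⟩ := (pvBestGo_ge_iff 3 (by omega) _).mp hc
      have hm := (pvRank3'_iff x y z).mp hRank
      simp only [List.mem_cons, List.not_mem_nil, or_false] at hm
      rcases hm with h|h|h|h|h|h|h
      · rw [h] at hInf; exact h1 ((pvIsIn_iff "GGG" form).mpr hInf)
      · rw [h] at hInf
        exact h2 (by simp only [List.any_eq_true]; exact ⟨"GGE", by simp, (pvIsIn_iff "GGE" form).mpr hInf⟩)
      · rw [h] at hInf
        exact h2 (by simp only [List.any_eq_true]; exact ⟨"EGG", by simp, (pvIsIn_iff "EGG" form).mpr hInf⟩)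
      · rw [h] at hInf
        exact h2 (by simp only [List.any_eq_true]; exact ⟨"GEG", by simp, (pvIsIn_iff "GEG" form).mpr hInf⟩)
      · rw [h] at hInf
        exact h3 (by simp only [List.any_eq_true]; exact ⟨"GGP", by simp, (pvIsIn_iff "GGP" form).mpr hInf⟩)
      · rw [h] at hInf
        exact h3 (by simp only [List.any_eq_true]; exact ⟨"PGG", by simp, (pvIsIn_iff "PGG" form).mpr hInf⟩)
      · rw [h] at hInf
        exact h3 (by simp only [List.any_eq_true]; exact ⟨"GPG", by simp, (pvIsIn_iff "GPG" form).mpr hInf⟩)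
    rw [show pvBestGo form.toList 0 = 2 from by omega]
    decide
  · have hge : 1 ≤ pvBestGo form.toList 0 := by
      simp only [List.any_eq_true, List.mem_cons, List.not_mem_nil, or_false] at h5
      obtain ⟨s, hs, h⟩ := h5
      rcases hs with rfl|rfl|rfl|rfl
      · exact (pvBestGo_ge_iff 1 (by omega) _).mpr ⟨'P', 'P', 'P', (pvIsIn_iff "PPP" form).mp h, by decide⟩
      · exact (pvBestGo_ge_iff 1 (by omega) _).mpr ⟨'E', 'P', 'P', (pvIsIn_iff "EPP" form).mp h, by decide⟩
      · exact (pvBestGo_ge_iff 1 (by omega) _).mpr ⟨'P', 'E', 'P', (pvIsIn_iff "PEP" form).mp h, by decide⟩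
      · exact (pvBestGo_ge_iff 1 (by omega) _).mpr ⟨'P', 'P', 'E', (pvIsIn_iff "PPE" form).mp h, by decide⟩
    have hlt : ¬ 2 ≤ pvBestGo form.toList 0 := by
      intro hc
      obtain ⟨x, y, z, hInf, hRank⟩ := (pvBestGo_ge_iff 2 (by omega) _).mp hc
      have hm := (pvRank2_iff x y z).mp hRank
      simp only [List.mem_cons, List.not_mem_nil, or_false] at hm
      rcases hm with h|h|h|h|h|h|h|h|h|h|h|h|h|h|h|h
      · rw [h] at hInf; exact h1 ((pvIsIn_iff "GGG" form).mpr hInf)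
      · rw [h] at hInf
        exact h2 (by simp only [List.any_eq_true]; exact ⟨"GGE", by simp, (pvIsIn_iff "GGE" form).mpr hInf⟩)
      · rw [h] at hInf
        exact h2 (by simp only [List.any_eq_true]; exact ⟨"EGG", by simp, (pvIsIn_iff "EGG" form).mpr hInf⟩)
      · rw [h] at hInf
        exact h2 (by simp only [List.any_eq_true]; exact ⟨"GEG", by simp, (pvIsIn_iff "GEG" form).mpr hInf⟩)
      · rw [h] at hInf
        exact h3 (by simp only [List.any_eq_true]; exact ⟨"GGP", by simp, (pvIsIn_iff "GGP" form).mpr hInf⟩)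
      · rw [h] at hInf
        exact h3 (by simp only [List.any_eq_true]; exact ⟨"PGG", by simp, (pvIsIn_iff "PGG" form).mpr hInf⟩)
      · rw [h] at hInf
        exact h3 (by simp only [List.any_eq_true]; exact ⟨"GPG", by simp, (pvIsIn_iff "GPG" form).mpr hInf⟩)
      · rw [h] at hInf
        exact h4 (by simp only [List.any_eq_true]; exact ⟨"GEE", by simp, (pvIsIn_iff "GEE" form).mpr hInf⟩)
      · rw [h] at hInf
        exact h4 (by simp only [List.any_eq_true]; exact ⟨"EGE", by simp, (pvIsIn_iff "EGE" form).mpr hInf⟩)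
      · rw [h] at hInf
        exact h4 (by simp only [List.any_eq_true]; exact ⟨"EEG", by simp, (pvIsIn_iff "EEG" form).mpr hInf⟩)
      · rw [h] at hInf
        exact h4 (by simp only [List.any_eq_true]; exact ⟨"GPE", by simp, (pvIsIn_iff "GPE" form).mpr hInf⟩)
      · rw [h] at hInf
        exact h4 (by simp only [List.any_eq_true]; exact ⟨"GEP", by simp, (pvIsIn_iff "GEP" form).mpr hInf⟩)
      · rw [h] at hInf
        exact h4 (by simp only [List.any_eq_true]; exact ⟨"EPG", by simp, (pvIsIn_iff "EPG" form).mpr hInf⟩)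
      · rw [h] at hInf
        exact h4 (by simp only [List.any_eq_true]; exact ⟨"EGP", by simp, (pvIsIn_iff "EGP" form).mpr hInf⟩)
      · rw [h] at hInf
        exact h4 (by simp only [List.any_eq_true]; exact ⟨"PGE", by simp, (pvIsIn_iff "PGE" form).mpr hInf⟩)
      · rw [h] at hInf
        exact h4 (by simp only [List.any_eq_true]; exact ⟨"PEG", by simp, (pvIsIn_iff "PEG" form).mpr hInf⟩)
    rw [show pvBestGo form.toList 0 = 1 from by omega]
    decide
  · have hlt : ¬ 1 ≤ pvBestGo form.toList 0 := by
      intro hc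
      obtain ⟨x, y, z, hInf, hRank⟩ := (pvBestGo_ge_iff 1 (by omega) _).mp hc
      have hm := (pvRank1_iff x y z).mp hRank
      simp only [List.mem_cons, List.not_mem_nil, or_false] at hm
      rcases hm with h|h|h|h|h|h|h|h|h|h|h|h|h|h|h|h|h|h|h|h
      · rw [h] at hInf; exact h1 ((pvIsIn_iff "GGG" form).mpr hInf)
      · rw [h] at hInf
        exact h2 (by simp only [List.any_eq_true]; exact ⟨"GGE", by simp, (pvIsIn_iff "GGE" form).mpr hInf⟩)
      · rw [h] at hInf
        exact h2 (by simp only [List.any_eq_true]; exact ⟨"EGG", by simp, (pvIsIn_iff "EGG" form).mpr hInf⟩)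
      · rw [h] at hInf
        exact h2 (by simp only [List.any_eq_true]; exact ⟨"GEG", by simp, (pvIsIn_iff "GEG" form).mpr hInf⟩)
      · rw [h] at hInf
        exact h3 (by simp only [List.any_eq_true]; exact ⟨"GGP", by simp, (pvIsIn_iff "GGP" form).mpr hInf⟩)
      · rw [h] at hInf
        exact h3 (by simp only [List.any_eq_true]; exact ⟨"PGG", by simp, (pvIsIn_iff "PGG" form).mpr hInf⟩)
      · rw [h] at hInf
        exact h3 (by simp only [List.any_eq_true]; exact ⟨"GPG", by simp, (pvIsIn_iff "GPG" form).mpr hInf⟩)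
      · rw [h] at hInf
        exact h4 (by simp only [List.any_eq_true]; exact ⟨"GEE", by simp, (pvIsIn_iff "GEE" form).mpr hInf⟩)
      · rw [h] at hInf
        exact h4 (by simp only [List.any_eq_true]; exact ⟨"EGE", by simp, (pvIsIn_iff "EGE" form).mpr hInf⟩)
      · rw [h] at hInf
        exact h4 (by simp only [List.any_eq_true]; exact ⟨"EEG", by simp, (pvIsIn_iff "EEG" form).mpr hInf⟩)
      · rw [h] at hInf
        exact h4 (by simp only [List.any_eq_true]; exact ⟨"GPE", by simp, (pvIsIn_iff "GPE" form).mpr hInf⟩)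
      · rw [h] at hInf
        exact h4 (by simp only [List.any_eq_true]; exact ⟨"GEP", by simp, (pvIsIn_iff "GEP" form).mpr hInf⟩)
      · rw [h] at hInf
        exact h4 (by simp only [List.any_eq_true]; exact ⟨"EPG", by simp, (pvIsIn_iff "EPG" form).mpr hInf⟩)
      · rw [h] at hInf
        exact h4 (by simp only [List.any_eq_true]; exact ⟨"EGP", by simp, (pvIsIn_iff "EGP" form).mpr hInf⟩)
      · rw [h] at hInf
        exact h4 (by simp only [List.any_eq_true]; exact ⟨"PGE", by simp, (pvIsIn_iff "PGE" form).mpr hInf⟩)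
      · rw [h] at hInf
        exact h4 (by simp only [List.any_eq_true]; exact ⟨"PEG", by simp, (pvIsIn_iff "PEG" form).mpr hInf⟩)
      · rw [h] at hInf
        exact h5 (by simp only [List.any_eq_true]; exact ⟨"PPP", by simp, (pvIsIn_iff "PPP" form).mpr hInf⟩)
      · rw [h] at hInf
        exact h5 (by simp only [List.any_eq_true]; exact ⟨"EPP", by simp, (pvIsIn_iff "EPP" form).mpr hInf⟩)
      · rw [h] at hInf
        exact h5 (by simp only [List.any_eq_true]; exact ⟨"PEP", by simp, (pvIsIn_iff "PEP" form).mpr hInf⟩)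
      · rw [h] at hInf
        exact h5 (by simp only [List.any_eq_true]; exact ⟨"PPE", by simp, (pvIsIn_iff "PPE" form).mpr hInf⟩)
    rw [show pvBestGo form.toList 0 = 0 from by omega]
    decide
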